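-- pv_equiv track=rewrite | github.com/nihzm/EvaluationFrameworkForNAQuantumCompilers | benchmark_tool/compilers.py | _countRydbergGates
-- ===== SOURCE A (Python) =====
-- from typing import Dict, List, Optional
--
-- def _countRydbergGates(instructions: List[str]) -> tuple[int, int]:
--     czCount = 0
--     cczCount = 0
--     inRydbergBlock = False
--     for line in instructions:
--         if line == "@rydberg":
--             inRydbergBlock = True
--             continue
--         if not inRydbergBlock:
--             continue
--         if line.startswith("}"):
--             inRydbergBlock = False
--             continue
--         if "ctrl(2) @ U(" in line:
--             cczCount += 1
--         elif "ctrl @ U(" in line: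
--             czCount += 1
--     return czCount, cczCount
-- ===== SOURCE B (Python) =====
-- from typing import List
--
-- def _countRydbergGates(instructions: List[str]) -> tuple[int, int]:
--     # pass 1: segmentation — collect the lines inside @rydberg blocks
--     inside = []
--     open_ = False
--     for line in instructions:
--         if line == "@rydberg":
--             open_ = True
--         elif line.startswith("}"):
--             open_ = False
--         elif open_:
--             inside.append(line)
--     # pass 2: count over the collected lines (CCZ takes precedence over CZ)
--     cczCount = sum(1 for l in inside if "ctrl(2) @ U(" in l)
--     czCount = sum(1 for l in inside if "ctrl(2) @ U(" not in l and "ctrl @ U(" in l)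
--     return czCount, cczCount
-- ===== Notes on version B (the rewrite author's own statement) =====
-- stated objective: alternative
-- what changed: Replaced A's single flag-driven scan that counts while walking with a two-pass decomposition: a segmentation pass collecting the lines inside @rydberg blocks into a list, then a separate counting pass (filter lengths, CCZ before CZ) over that list.
import Mathlib
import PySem

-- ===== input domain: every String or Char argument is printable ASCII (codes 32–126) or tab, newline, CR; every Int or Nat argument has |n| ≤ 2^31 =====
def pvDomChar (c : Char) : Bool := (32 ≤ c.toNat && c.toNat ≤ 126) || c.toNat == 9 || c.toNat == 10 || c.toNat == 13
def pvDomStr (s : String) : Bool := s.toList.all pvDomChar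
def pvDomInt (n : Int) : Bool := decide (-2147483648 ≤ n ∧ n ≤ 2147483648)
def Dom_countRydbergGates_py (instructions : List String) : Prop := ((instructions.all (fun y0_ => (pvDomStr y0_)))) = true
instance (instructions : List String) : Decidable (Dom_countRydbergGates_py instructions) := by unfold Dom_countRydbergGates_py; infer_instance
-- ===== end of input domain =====

-- B splits A's single flag-driven counting scan into a segmentation pass that collects the
-- lines inside @rydberg blocks and a separate counting pass over that list (objective: alternative).


-- ===== PORT A =====
-- one pass: (czCount, cczCount, inRydbergBlock) state machine
def pvStepA (st : Int × Int × Bool) (line : String) : Int × Int × Bool :=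
  if line == "@rydberg" then (st.1, st.2.1, true)
  else if !st.2.2 then st
  else if PySem.Str.startswith line "}" then (st.1, st.2.1, false)
  else if PySem.Str.isIn "ctrl(2) @ U(" line then (st.1, st.2.1 + 1, st.2.2)
  else if PySem.Str.isIn "ctrl @ U(" line then (st.1 + 1, st.2.1, st.2.2)
  else st

def countRydbergGates_py (instructions : List String) : Int × Int :=
  let st := instructions.foldl pvStepA (0, 0, false)
  (st.1, st.2.1)

-- ===== PORT B =====
-- pass 1: collect the lines inside @rydberg blocks
def pvStepB (st : List String × Bool) (line : String) : List String × Bool :=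
  if line == "@rydberg" then (st.1, true)
  else if PySem.Str.startswith line "}" then (st.1, false)
  else if st.2 then (st.1 ++ [line], st.2)
  else st

def pvIsCCZ (l : String) : Bool := PySem.Str.isIn "ctrl(2) @ U(" l
def pvIsCZ (l : String) : Bool := !PySem.Str.isIn "ctrl(2) @ U(" l && PySem.Str.isIn "ctrl @ U(" l

def countRydbergGates_py_alt (instructions : List String) : Int × Int :=
  let inside := (instructions.foldl pvStepB ([], false)).1
  let cczCount : Int := (inside.filter pvIsCCZ).length
  let czCount : Int := (inside.filter pvIsCZ).length
  (czCount, cczCount)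

-- ===== PRECONDITION & SPEC =====
def Spec_countRydbergGates_py (instructions : List String) (out : Int × Int) : Prop := out = countRydbergGates_py_alt instructions
instance (instructions : List String) (out : Int × Int) : Decidable (Spec_countRydbergGates_py instructions out) := by unfold Spec_countRydbergGates_py; infer_instance

-- ===== CLAIM (what is proved, stated in full; the proofs are below) =====
def Claim_equal_countRydbergGates_py : Prop := ∀ (instructions : List String), Dom_countRydbergGates_py instructions → Spec_countRydbergGates_py instructions (countRydbergGates_py instructions)

-- ===== LEMMAS AND PROOFS =====

-- step lemmas (keep pvStepA/pvStepB folded during the inductions)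
-- from 'startswith = false' to the negation if_neg wants, without simp-normalising the term
theorem pvNe (x : Bool) (h : x = false) : ¬ (x = true) := by intro hh; rw [h] at hh; simp at hh

theorem stepB_ryd (st : List String × Bool) (l : String) (h : (l == "@rydberg") = true) :
    pvStepB st l = (st.1, true) := by simp only [pvStepB]; rw [if_pos h]
theorem stepB_close (st : List String × Bool) (l : String) (h1 : (l == "@rydberg") = false)
    (h2 : PySem.Str.startswith l "}" = true) : pvStepB st l = (st.1, false) := by
  simp only [pvStepB]; rw [if_neg (pvNe _ h1), if_pos h2]
theorem stepB_in (acc : List String) (l : String) (h1 : (l == "@rydberg") = false)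
    (h2 : PySem.Str.startswith l "}" = false) : pvStepB (acc, true) l = (acc ++ [l], true) := by
  simp only [pvStepB]; rw [if_neg (pvNe _ h1), if_neg (pvNe _ h2)]; simp
theorem stepB_out (acc : List String) (l : String) (h1 : (l == "@rydberg") = false)
    (h2 : PySem.Str.startswith l "}" = false) : pvStepB (acc, false) l = (acc, false) := by
  simp only [pvStepB]; rw [if_neg (pvNe _ h1), if_neg (pvNe _ h2)]; simp

theorem stepA_ryd (st : Int × Int × Bool) (l : String) (h : (l == "@rydberg") = true) :
    pvStepA st l = (st.1, st.2.1, true) := by simp only [pvStepA]; rw [if_pos h]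
theorem stepA_out (cz ccz : Int) (l : String) (h : (l == "@rydberg") = false) :
    pvStepA (cz, ccz, false) l = (cz, ccz, false) := by
  simp only [pvStepA]; rw [if_neg (pvNe _ h)]; simp
theorem stepA_close (cz ccz : Int) (l : String) (h1 : (l == "@rydberg") = false)
    (h2 : PySem.Str.startswith l "}" = true) : pvStepA (cz, ccz, true) l = (cz, ccz, false) := by
  simp only [pvStepA]; rw [if_neg (pvNe _ h1), if_neg (by simp), if_pos h2]
theorem stepA_body (cz ccz : Int) (l : String) (h1 : (l == "@rydberg") = false)
    (h2 : PySem.Str.startswith l "}" = false) :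
    pvStepA (cz, ccz, true) l =
      (cz + if pvIsCZ l then 1 else 0, ccz + if pvIsCCZ l then 1 else 0, true) := by
  simp only [pvStepA]
  rw [if_neg (pvNe _ h1), if_neg (by simp), if_neg (pvNe _ h2)]
  by_cases h3 : PySem.Str.isIn "ctrl(2) @ U(" l = true
  · have h3c : PySem.Chars.isIn ['c','t','r','l','(','2',')',' ','@',' ','U','('] l.toList = true := by
      simpa using h3
    rw [if_pos h3]; simp [pvIsCZ, pvIsCCZ, h3c]
  · have h3f : PySem.Str.isIn "ctrl(2) @ U(" l = false := by simpa using h3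
    have h3c : PySem.Chars.isIn ['c','t','r','l','(','2',')',' ','@',' ','U','('] l.toList = false := by
      simpa using h3f
    rw [if_neg h3]
    by_cases h4 : PySem.Str.isIn "ctrl @ U(" l = true
    · have h4c : PySem.Chars.isIn ['c','t','r','l',' ','@',' ','U','('] l.toList = true := by
        simpa using h4
      rw [if_pos h4]; simp [pvIsCZ, pvIsCCZ, h3c, h4c]
    · have h4f : PySem.Str.isIn "ctrl @ U(" l = false := by simpa using h4
      have h4c : PySem.Chars.isIn ['c','t','r','l',' ','@',' ','U','('] l.toList = false := by
        simpa using h4f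
      rw [if_neg h4]; simp [pvIsCZ, pvIsCCZ, h3c, h4c]

-- B's accumulator only ever grows by appending: factor it out.
theorem pvB_acc (lines : List String) : ∀ (acc : List String) (b : Bool),
    lines.foldl pvStepB (acc, b)
      = (acc ++ (lines.foldl pvStepB ([], b)).1, (lines.foldl pvStepB ([], b)).2) := by
  induction lines with
  | nil => intro acc b; simp
  | cons l rest ih =>
      intro acc b
      simp only [List.foldl_cons]
      by_cases h1 : (l == "@rydberg") = true
      · rw [stepB_ryd _ _ h1, stepB_ryd ([], b) _ h1, ih acc, ih ([] : List String)]
      · replace h1 : (l == "@rydberg") = false := by simpa using h1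
        by_cases h2 : PySem.Str.startswith l "}" = true
        · rw [stepB_close _ _ h1 h2, stepB_close ([], b) _ h1 h2, ih acc, ih ([] : List String)]
        · replace h2 : PySem.Str.startswith l "}" = false := by simpa using h2
          cases b with
          | false => rw [stepB_out _ _ h1 h2, stepB_out _ _ h1 h2, ih acc, ih ([] : List String)]
          | true =>
              rw [stepB_in _ _ h1 h2, stepB_in _ _ h1 h2]
              simp only [List.nil_append]
              rw [ih (acc ++ [l]), ih ([l])]
              simp

-- Main invariant: A's running counters ahead of B's count of the collected segment.
theorem pvAB (lines : List String) : ∀ (cz ccz : Int) (b : Bool),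
    ((lines.foldl pvStepA (cz, ccz, b)).1, (lines.foldl pvStepA (cz, ccz, b)).2.1)
      = (cz + ((lines.foldl pvStepB ([], b)).1.filter pvIsCZ).length,
         ccz + ((lines.foldl pvStepB ([], b)).1.filter pvIsCCZ).length) := by
  induction lines with
  | nil => intro cz ccz b; simp
  | cons l rest ih =>
      intro cz ccz b
      simp only [List.foldl_cons]
      by_cases h1 : (l == "@rydberg") = true
      · rw [stepA_ryd _ _ h1, stepB_ryd ([], b) _ h1]; exact ih cz ccz true
      · replace h1 : (l == "@rydberg") = false := by simpa using h1
        by_cases h2 : PySem.Str.startswith l "}" = true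
        · cases b with
          | false =>
              rw [stepA_out _ _ _ h1, stepB_close ([], false) _ h1 h2]; exact ih cz ccz false
          | true =>
              rw [stepA_close _ _ _ h1 h2, stepB_close ([], true) _ h1 h2]; exact ih cz ccz false
        · replace h2 : PySem.Str.startswith l "}" = false := by simpa using h2
          cases b with
          | false =>
              rw [stepA_out _ _ _ h1, stepB_out _ _ h1 h2]; exact ih cz ccz false
          | true =>
              rw [stepA_body _ _ _ h1 h2, stepB_in _ _ h1 h2]
              simp only [List.nil_append]
              rw [pvB_acc rest [l] true,
                ih (cz + if pvIsCZ l then 1 else 0) (ccz + if pvIsCCZ l then 1 else 0) true]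
              simp only [List.nil_append, List.filter_append, List.length_append]
              by_cases h3 : pvIsCZ l <;> by_cases h4 : pvIsCCZ l <;>
                simp [h3, h4, Prod.ext_iff] <;> omega

-- ===== VERDICT (by name: the statement is the Claim_ definition above) =====
theorem countRydbergGates_py_spec : Claim_equal_countRydbergGates_py := by
  intro instructions _
  unfold Spec_countRydbergGates_py countRydbergGates_py countRydbergGates_py_alt
  have h := pvAB instructions 0 0 false
  simp only [Prod.mk.injEq] at h
  simp [h.1, h.2]
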